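-- pv_equiv track=rewrite | github.com/Kearskill/RubyCode | PLN/q7.py | count
-- ===== SOURCE A (Python) =====
-- def count(arr):
--     results = []
--     for e in arr:
--         res = 0
--         arr = []
--         for val in e:
--             arr.append(val)
--             for x in arr:
--                 if sum(arr) - x == x:
--                     res += 1
--         results.append(res)
--     return results
-- ===== SOURCE B (Python) =====
-- def count(arr):
--     results = []
--     for e in arr:
--         res = 0
--         total = 0
--         cnt = {}
--         for val in e:
--             total += val
--             cnt[val] = cnt.get(val, 0) + 1
--             if total % 2 == 0:
--                 res += cnt.get(total // 2, 0)
--         results.append(res)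
--     return results
-- ===== Notes on version B (the rewrite author's own statement) =====
-- stated objective: faster
-- what changed: Replaced A's per-element rescan of the growing prefix (with an inner sum() call each time) by a single pass per sublist keeping a running sum and a counter dict, adding cnt.get(total//2, 0) when the running sum is even.
import Mathlib
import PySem

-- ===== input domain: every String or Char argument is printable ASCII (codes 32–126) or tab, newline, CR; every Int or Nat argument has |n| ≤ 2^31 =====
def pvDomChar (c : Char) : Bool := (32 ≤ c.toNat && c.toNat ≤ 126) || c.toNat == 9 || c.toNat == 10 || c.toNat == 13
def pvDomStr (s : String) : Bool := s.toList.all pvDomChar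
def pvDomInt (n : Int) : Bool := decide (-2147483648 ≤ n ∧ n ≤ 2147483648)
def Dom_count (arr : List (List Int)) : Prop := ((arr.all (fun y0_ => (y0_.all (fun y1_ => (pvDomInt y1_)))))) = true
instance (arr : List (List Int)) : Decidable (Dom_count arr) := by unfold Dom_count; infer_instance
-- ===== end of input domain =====

-- B replaces A's rescan of the growing prefix (with an inner sum()) per element by one pass
-- per sublist with a running sum and a counter dict.

-- ===== PORT A =====
-- per-element body of A's inner loop: append val to the prefix, then scan the prefix
-- counting x with sum(prefix) - x == x; state = (res, prefix)
def stepA (st : Int × List Int) (val : Int) : Int × List Int :=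
  let arr2 := st.2 ++ [val]
  (arr2.foldl (fun r x => if arr2.sum - x = x then r + 1 else r) st.1, arr2)

def countInnerA (e : List Int) : Int := (e.foldl stepA (0, [])).1

def count (arr : List (List Int)) : List Int :=
  arr.foldl (fun results e => results ++ [countInnerA e]) []

-- ===== PORT B =====
-- per-element body of B's loop: total += val; cnt[val] = cnt.get(val, 0) + 1;
-- if total % 2 == 0: res += cnt.get(total // 2, 0); state = (total, cnt, res)
def stepB (st : Int × PySem.Dict Int Int × Int) (val : Int) : Int × PySem.Dict Int Int × Int :=
  let total := st.1 + val
  let cnt := st.2.1.insert val (st.2.1.getD val 0 + 1)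
  (total, cnt,
    if PySem.Int.mod total 2 = 0 then st.2.2 + cnt.getD (PySem.Int.floordiv total 2) 0
    else st.2.2)

def countInnerB (e : List Int) : Int :=
  (e.foldl stepB (0, PySem.Dict.empty, 0)).2.2

def count_alt (arr : List (List Int)) : List Int :=
  arr.foldl (fun results e => results ++ [countInnerB e]) []

-- ===== PRECONDITION & SPEC =====
def Spec_count (arr : List (List Int)) (out : List Int) : Prop := out = count_alt arr
instance (arr : List (List Int)) (out : List Int) : Decidable (Spec_count arr out) := by unfold Spec_count; infer_instance

-- ===== CLAIM (what is proved, stated in full; the proofs are below) =====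
def Claim_equal_count : Prop := ∀ (arr : List (List Int)), Dom_count arr → Spec_count arr (count arr)

-- ===== LEMMAS AND PROOFS =====

-- the counter dict B has built after processing the prefix p
def counterI (p : List Int) : PySem.Dict Int Int :=
  p.foldl (fun d x => d.insert x (d.getD x 0 + 1)) PySem.Dict.empty

lemma counterI_append (p : List Int) (val : Int) :
    counterI (p ++ [val]) = (counterI p).insert val ((counterI p).getD val 0 + 1) := by
  unfold counterI; rw [List.foldl_append]; rfl

lemma counterI_getD (p : List Int) (v : Int) :
    (counterI p).getD v 0 = (p.count v : Int) := by
  unfold counterI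
  rw [PySem.Dict.getD_foldl_insert_add_one]
  simp

-- A's inner scan of a prefix q is a countP of the condition, added to the accumulator
lemma scanA_eq_countP (q : List Int) (s r : Int) :
    q.foldl (fun r x => if s - x = x then r + 1 else r) r
      = r + (q.countP (fun x => decide (s - x = x))) := by
  induction q generalizing r with
  | nil => simp
  | cons x t ih =>
      simp only [List.foldl_cons, List.countP_cons, ih]
      by_cases h : s - x = x
      · simp only [h, if_pos, decide_eq_true_eq]; push_cast; ring
      · simp [h]

-- the condition s - x == x holds exactly for x = s // 2 when s is even, never when s is odd
lemma countP_half (q : List Int) (s : Int) :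
    (q.countP (fun x => decide (s - x = x)) : Int)
      = (if PySem.Int.mod s 2 = 0 then (q.count (PySem.Int.floordiv s 2) : Int) else 0) := by
  by_cases h : PySem.Int.mod s 2 = 0
  · have hdvd : (2 : Int) ∣ s := (PySem.Int.mod_eq_zero_iff_dvd s 2).1 h
    obtain ⟨k, hk⟩ := hdvd
    have hfd : PySem.Int.floordiv s 2 = k := by
      rw [PySem.Int.floordiv_eq_ediv_of_pos (by norm_num)]
      omega
    simp only [h, if_pos, hfd, List.count_eq_countP]
    congr 1
    apply List.countP_congr
    intro x _
    constructor <;> (intro hx; simp_all; omega)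
  · have hfalse : ∀ x ∈ q, ¬ (s - x = x) := by
      intro x _ hx
      exact h ((PySem.Int.mod_eq_zero_iff_dvd s 2).2 ⟨x, by omega⟩)
    rw [if_neg h, List.countP_eq_zero.2 (by simpa using hfalse)]
    simp

-- one step of the two loops preserves the invariant state correspondence
lemma step_corr (p : List Int) (r val : Int) :
    stepB (p.sum, counterI p, r) val
      = ((p ++ [val]).sum, counterI (p ++ [val]),
          (p ++ [val]).foldl (fun r x => if (p ++ [val]).sum - x = x then r + 1 else r) r) := by
  unfold stepB
  have hsum : p.sum + val = (p ++ [val]).sum := by simp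
  refine Prod.ext hsum (Prod.ext ?_ ?_)
  · simp [counterI_append]
  · simp only [← counterI_append, hsum]
    rw [scanA_eq_countP, countP_half, counterI_getD]
    simp
    split_ifs <;> ring

-- the two inner loops agree for any common prefix p and accumulator r
lemma inner_invariant (e : List Int) : ∀ (p : List Int) (r : Int),
    (e.foldl stepA (r, p)).1 = (e.foldl stepB (p.sum, counterI p, r)).2.2 := by
  induction e with
  | nil => intro p r; rfl
  | cons val t ih =>
      intro p r
      simp only [List.foldl_cons, step_corr]
      exact ih (p ++ [val]) _

lemma inner_eq (e : List Int) : countInnerA e = countInnerB e := by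
  unfold countInnerA countInnerB
  have := inner_invariant e [] 0
  simpa [counterI] using this

-- ===== VERDICT (by name: the statement is the Claim_ definition above) =====
theorem count_spec : Claim_equal_count := by
  intro arr _
  unfold Spec_count count count_alt
  rw [PySem.List.foldl_append_singleton_eq_map, PySem.List.foldl_append_singleton_eq_map]
  simp [inner_eq]
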